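-- pv_equiv track=rewrite | github.com/yn-sun/paper_source_code | CLSTM/cyChallengeLib.py | labelToNum
-- ===== SOURCE A (Python) =====
-- def labelToNum(labelDict):  # 把label转换微数字
--     for i in labelDict:
--         if labelDict[i] == 'N':
--             labelDict[i] = 0
--         elif labelDict[i] == 'A':
--             labelDict[i] = 1
--         elif labelDict[i] == 'O':
--             labelDict[i] = 2
--         else:
--             labelDict[i] = 3
--     return labelDict
-- ===== SOURCE B (Python) =====
-- def labelToNum(labelDict):
--     # staged passes: one sweep per known label, then a clean-up sweep for the rest
--     for code, lab in enumerate(('N', 'A', 'O')):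
--         for k in labelDict:
--             if labelDict[k] == lab:
--                 labelDict[k] = code
--     for k in labelDict:
--         if isinstance(labelDict[k], str):
--             labelDict[k] = 3
--     return labelDict
-- ===== Notes on version B (the rewrite author's own statement) =====
-- stated objective: alternative
-- what changed: Replaces A's single per-entry if-elif cascade by staged passes: one full sweep over the dict per label ('N','A','O') converting matching entries to its code, then a final sweep turning every still-string entry into 3.
import Mathlib
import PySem

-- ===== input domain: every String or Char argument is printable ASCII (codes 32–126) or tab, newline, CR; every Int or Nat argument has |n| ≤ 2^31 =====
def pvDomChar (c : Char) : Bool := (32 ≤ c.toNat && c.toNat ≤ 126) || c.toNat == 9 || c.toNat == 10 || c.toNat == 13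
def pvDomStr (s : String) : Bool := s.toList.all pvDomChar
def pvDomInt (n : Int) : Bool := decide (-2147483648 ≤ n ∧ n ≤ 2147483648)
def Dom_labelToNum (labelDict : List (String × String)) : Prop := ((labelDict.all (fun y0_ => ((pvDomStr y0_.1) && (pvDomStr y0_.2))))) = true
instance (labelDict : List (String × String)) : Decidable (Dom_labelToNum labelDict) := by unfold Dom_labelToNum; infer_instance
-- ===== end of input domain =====

-- B converts the dict in staged passes (one sweep per label, then a clean-up sweep) instead of
-- A's single per-entry if-elif cascade; in Python both mutate the dict in place — the equivalence
-- proved here is about the returned dict's contents.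

-- ===== PORT A =====
def labelToNum (labelDict : List (String × String)) : List (String × Int) :=
  labelDict.map (fun p =>
    (p.1, if p.2 == "N" then (0 : Int)
          else if p.2 == "A" then 1
          else if p.2 == "O" then 2
          else 3))

-- ===== PORT B =====
-- entries are String (not yet converted) or Int (converted); one sweep rewrites matches of one label
def labelSweep (lab : String) (code : Int) (st : List (String × (String ⊕ Int))) :
    List (String × (String ⊕ Int)) :=
  st.map (fun p => if p.2 = Sum.inl lab then (p.1, Sum.inr code) else p)

def labelToNum_alt (labelDict : List (String × String)) : List (String × Int) :=
  let st0 : List (String × (String ⊕ Int)) := labelDict.map (fun p => (p.1, Sum.inl p.2))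
  let st := [("N", (0 : Int)), ("A", 1), ("O", 2)].foldl (fun st lc => labelSweep lc.1 lc.2 st) st0
  st.map (fun p => (p.1, match p.2 with | Sum.inl _ => (3 : Int) | Sum.inr n => n))

-- ===== PRECONDITION & SPEC =====
def Spec_labelToNum (labelDict : List (String × String)) (out : List (String × Int)) : Prop := out = labelToNum_alt labelDict
instance (labelDict : List (String × String)) (out : List (String × Int)) : Decidable (Spec_labelToNum labelDict out) := by unfold Spec_labelToNum; infer_instance

-- ===== CLAIM (what is proved, stated in full; the proofs are below) =====
def Claim_equal_labelToNum : Prop := ∀ (labelDict : List (String × String)), Dom_labelToNum labelDict → Spec_labelToNum labelDict (labelToNum labelDict)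

-- ===== LEMMAS AND PROOFS =====

-- ===== VERDICT (by name: the statement is the Claim_ definition above) =====
theorem labelToNum_spec : Claim_equal_labelToNum := by
  intro d _
  unfold Spec_labelToNum labelToNum labelToNum_alt
  simp only [List.foldl, labelSweep, List.map_map]
  refine (List.map_congr_left (fun p _ => ?_)).symm
  by_cases h1 : p.2 = "N" <;> by_cases h2 : p.2 = "A" <;> by_cases h3 : p.2 = "O" <;>
    simp [Function.comp, h1, h2, h3]
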